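-- pv_equiv track=rewrite | github.com/Piyushteli/Python_Programming | Python_Programming_Part2/Project.py | sentiment_analysis
-- ===== SOURCE A (Python) =====
-- def sentiment_analysis(text):
--     positive_words=["good","great","excellent","awesome","happy"]
--     negative_words=["bad","terriable","awful","poor","sad"]
--
--     text=text.lower()
--     words=text.split()
--
--     positive_count=sum(1 for word in words if word in positive_words)
--     negative_count=sum(1 for word in words if word in negative_words)
--
--     if positive_count>negative_count:
--         return "Positive"
--     elif negative_count>positive_count:
--         return "Negative"
--     else:
--         return "Neutral"
-- ===== SOURCE B (Python) =====
-- def sentiment_analysis(text):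
--     lexicon = {"good": 1, "great": 1, "excellent": 1, "awesome": 1, "happy": 1,
--                "bad": -1, "terriable": -1, "awful": -1, "poor": -1, "sad": -1}
--     score = 0
--     for word in text.lower().split():
--         score += lexicon.get(word, 0)
--     if score > 0:
--         return "Positive"
--     if score < 0:
--         return "Negative"
--     return "Neutral"
-- ===== Notes on version B (the rewrite author's own statement) =====
-- stated objective: alternative
-- what changed: Replaces A's two membership-count comprehensions over two constant word lists with a single word->weight dictionary whose looked-up weights are summed in one loop and classified by the sign of the net score.
import Mathlib
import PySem

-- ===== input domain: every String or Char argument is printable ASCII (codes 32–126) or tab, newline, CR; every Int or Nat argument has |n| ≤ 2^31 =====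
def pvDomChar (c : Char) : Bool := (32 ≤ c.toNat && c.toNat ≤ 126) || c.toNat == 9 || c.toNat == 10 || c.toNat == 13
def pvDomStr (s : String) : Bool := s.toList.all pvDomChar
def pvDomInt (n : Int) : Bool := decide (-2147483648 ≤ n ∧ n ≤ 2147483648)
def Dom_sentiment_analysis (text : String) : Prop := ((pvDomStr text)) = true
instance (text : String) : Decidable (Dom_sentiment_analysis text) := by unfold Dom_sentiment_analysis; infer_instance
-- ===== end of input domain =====

-- B replaces A's two membership-count passes by a word->weight dictionary summed by a recursive helper and classified by sign: alternative decomposition, same cost.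


-- ===== PORT A =====
def sentiment_analysis (text : String) : String :=
  let positive_words : List String := ["good", "great", "excellent", "awesome", "happy"]
  let negative_words : List String := ["bad", "terriable", "awful", "poor", "sad"]
  let text := PySem.Str.lower text
  let words := PySem.Str.split₀ text
  let positive_count : Int :=
    words.foldl (fun acc word => if positive_words.contains word then acc + 1 else acc) 0
  let negative_count : Int :=
    words.foldl (fun acc word => if negative_words.contains word then acc + 1 else acc) 0
  if positive_count > negative_count then "Positive"
  else if negative_count > positive_count then "Negative"
  else "Neutral"

-- ===== PORT B =====
-- the word -> weight dictionary of Source B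
def pvLexicon : PySem.Dict String Int :=
  PySem.Dict.ofList
    [("good", 1), ("great", 1), ("excellent", 1), ("awesome", 1), ("happy", 1),
     ("bad", -1), ("terriable", -1), ("awful", -1), ("poor", -1), ("sad", -1)]

def sentiment_analysis_alt (text : String) : String :=
  -- Source B's loop: for word in words: score += lexicon.get(word, 0)
  let score : Int :=
    (PySem.Str.split₀ (PySem.Str.lower text)).foldl
      (fun score word => score + PySem.Dict.getD pvLexicon word 0) 0
  if score > 0 then "Positive"
  else if score < 0 then "Negative"
  else "Neutral"

-- ===== PRECONDITION & SPEC =====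
def Spec_sentiment_analysis (text : String) (out : String) : Prop := out = sentiment_analysis_alt text
instance (text : String) (out : String) : Decidable (Spec_sentiment_analysis text out) := by unfold Spec_sentiment_analysis; infer_instance

-- ===== CLAIM (what is proved, stated in full; the proofs are below) =====
def Claim_equal_sentiment_analysis : Prop := ∀ (text : String), Dom_sentiment_analysis text → Spec_sentiment_analysis text (sentiment_analysis text)

-- ===== LEMMAS AND PROOFS =====

-- The lexicon weight of a word is (+1 if it is a positive word) minus (+1 if it is a negative word).
theorem pv_word_val (w : String) :
    PySem.Dict.getD pvLexicon w 0
      = (if (["good", "great", "excellent", "awesome", "happy"] : List String).contains w then (1 : Int) else 0)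
        - (if (["bad", "terriable", "awful", "poor", "sad"] : List String).contains w then (1 : Int) else 0) := by
  by_cases hp : (["good", "great", "excellent", "awesome", "happy"] : List String).contains w
  · simp only [List.contains_cons, List.contains_nil, Bool.or_eq_true, beq_iff_eq,
      Bool.false_eq_true, or_false] at hp
    rcases hp with h | h | h | h | h <;> subst h <;> decide
  · by_cases hn : (["bad", "terriable", "awful", "poor", "sad"] : List String).contains w
    · simp only [List.contains_cons, List.contains_nil, Bool.or_eq_true, beq_iff_eq,
        Bool.false_eq_true, or_false] at hn
      rcases hn with h | h | h | h | h <;> subst h <;>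
        simp_all <;> decide
    · simp only [List.contains_cons, List.contains_nil, Bool.or_eq_true, beq_iff_eq,
        Bool.false_eq_true, or_false, not_or] at hp hn
      obtain ⟨h1, h2, h3, h4, h5⟩ := hp
      obtain ⟨h6, h7, h8, h9, h10⟩ := hn
      have hm : pvLexicon = PySem.Dict.mk
          [("good", 1), ("great", 1), ("excellent", 1), ("awesome", 1), ("happy", 1),
           ("bad", -1), ("terriable", -1), ("awful", -1), ("poor", -1), ("sad", -1)] := by decide
      rw [hm]
      simp [PySem.Dict.getD, beq_iff_eq,
        Ne.symm h1, Ne.symm h2, Ne.symm h3, Ne.symm h4, Ne.symm h5,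
        Ne.symm h6, Ne.symm h7, Ne.symm h8, Ne.symm h9, Ne.symm h10,
        PySem.Dict.get?, h1, h2, h3, h4, h5, h6, h7, h8, h9, h10]

-- The summed lexicon weights equal (number of positive words) - (number of negative words).
theorem pv_net_counts (ws : List String) :
    ws.foldl (fun score word => score + PySem.Dict.getD pvLexicon word 0) 0
      = (ws.countP (fun w => (["good", "great", "excellent", "awesome", "happy"] : List String).contains w) : Int)
        - (ws.countP (fun w => (["bad", "terriable", "awful", "poor", "sad"] : List String).contains w) : Int) := by
  rw [PySem.List.foldl_add]
  rw [zero_add]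
  induction ws with
  | nil => rfl
  | cons w ws ih =>
    simp only [List.map_cons, List.sum_cons, List.countP_cons, ih, pv_word_val w]
    split_ifs <;> simp <;> omega

-- ===== VERDICT (by name: the statement is the Claim_ definition above) =====
theorem sentiment_analysis_spec : Claim_equal_sentiment_analysis := by
  unfold Claim_equal_sentiment_analysis
  intro text _
  unfold Spec_sentiment_analysis sentiment_analysis sentiment_analysis_alt
  simp only
  set ws := PySem.Str.split₀ (PySem.Str.lower text) with hws
  rw [PySem.List.foldl_if_add_one, PySem.List.foldl_if_add_one, pv_net_counts, zero_add, zero_add]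
  set P := (ws.countP (fun w => (["good", "great", "excellent", "awesome", "happy"] : List String).contains w) : Int)
  set N := (ws.countP (fun w => (["bad", "terriable", "awful", "poor", "sad"] : List String).contains w) : Int)
  by_cases h1 : P > N
  · rw [if_pos h1, if_pos (by omega : P - N > 0)]
  · rw [if_neg h1]
    by_cases h2 : N > P
    · rw [if_pos h2, if_neg (by omega : ¬ P - N > 0), if_pos (by omega : P - N < 0)]
    · rw [if_neg h2, if_neg (by omega : ¬ P - N > 0), if_neg (by omega : ¬ P - N < 0)]
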